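-- pv_equiv track=rewrite | github.com/cwjki/DAA-problems | Problema 3/code/Auxiliares.py | init_solution
-- ===== SOURCE A (Python) =====
-- def acum_sum(elems):
--     sum = []
--     sum.append((elems[0],0))
--     for i in range(1,len(elems)):
--         sum.append((sum[i-1][0] + elems[i],i))
--     return sum
--
-- def init_solution(elemens):
--     temp_sum = sorted(acum_sum(elemens))
--     sum = []
--     index = []
--     item = temp_sum.pop()
--     sum.append(item[0])
--     index.append([item[1]])
--     while len(temp_sum) > 0:
--         item = temp_sum.pop()
--         if item[0] == sum[len(sum)-1]:
--             index[len(index)-1].append(item[1])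
--         else:
--             sum.append(item[0])
--             index.append([item[1]])
--     return sum,index
-- ===== SOURCE B (Python) =====
-- def init_solution(elemens):
--     buckets = {}
--     s = 0
--     for i, e in enumerate(elemens):
--         s += e
--         buckets[s] = buckets.get(s, []) + [i]
--     sums = sorted(buckets, reverse=True)
--     index = [buckets[s][::-1] for s in sums]
--     return sums, index
-- ===== Notes on version B (the rewrite author's own statement) =====
-- stated objective: idiomatic
-- what changed: Replaces A's sort-all-(prefixsum,index)-pairs-then-pop-and-mutate-last grouping loop with a single pass that groups indices in a dict keyed by prefix sum, then sorts the distinct keys descending and reverses each bucket.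
import Mathlib
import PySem

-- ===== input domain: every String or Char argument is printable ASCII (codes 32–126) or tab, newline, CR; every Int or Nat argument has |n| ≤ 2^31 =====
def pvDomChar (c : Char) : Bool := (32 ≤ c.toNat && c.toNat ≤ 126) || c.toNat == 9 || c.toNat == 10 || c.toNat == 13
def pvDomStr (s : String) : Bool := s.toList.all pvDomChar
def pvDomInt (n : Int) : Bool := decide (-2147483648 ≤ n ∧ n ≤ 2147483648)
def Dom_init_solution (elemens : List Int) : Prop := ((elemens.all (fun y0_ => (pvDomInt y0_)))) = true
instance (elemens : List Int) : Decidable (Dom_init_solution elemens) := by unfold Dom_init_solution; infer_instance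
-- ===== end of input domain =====

-- B groups indices by prefix sum in a dict in one pass, then sorts the distinct sums descending
-- and reverses each bucket (objective: idiomatic); A sorts all (prefix-sum, index) pairs and
-- groups them by popping from the sorted list while mutating the last output entry.

-- ===== PORT A =====
-- the loop of acum_sum: sum[i-1][0] is the running prefix sum 'prev'
def acumAux (prev : Int) (i : Int) : List Int → List (Int × Int)
  | [] => []
  | e :: t => (prev + e, i) :: acumAux (prev + e) (i + 1) t

def acum_sum : List Int → List (Int × Int)
  | [] => []                    -- Python raises IndexError (elems[0]) here; excluded by Pre_
  | e :: t => (e, 0) :: acumAux e 1 t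

-- index[len(index)-1].append(x)
def appendLast : List (List Int) → Int → List (List Int)
  | [], _ => []
  | [l], x => [l ++ [x]]
  | h :: g :: t, x => h :: appendLast (g :: t) x

-- the while-loop: successive pops from the end of temp_sum = traversal of its reverse
def loopA : List (Int × Int) → List Int → List (List Int) → List Int × List (List Int)
  | [], sums, idx => (sums, idx)
  | it :: rest, sums, idx =>
    if it.1 == sums.getLastD 0 then loopA rest sums (appendLast idx it.2)
    else loopA rest (sums ++ [it.1]) (idx ++ [[it.2]])

def init_solution (elemens : List Int) : List Int × List (List Int) :=
  -- Python's tuple sort is the lexicographic order: key = toLex into Int ×ₗ Int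
  let temp := PySem.List.sorted (acum_sum elemens) (fun p => (toLex p : Int ×ₗ Int)) false
  match temp.reverse with
  | [] => ([], [])              -- Python raises IndexError (pop from empty) here; excluded by Pre_
  | it :: rest => loopA rest [it.1] [[it.2]]

-- ===== PORT B =====
def init_solution_alt (elemens : List Int) : List Int × List (List Int) :=
  let st := (PySem.List.enumerate elemens).foldl
      (fun (st : PySem.Dict Int (List Int) × Int) pr =>
        let s := st.2 + pr.2
        (st.1.modify s [] (fun l => l ++ [pr.1]), s))
      (PySem.Dict.empty, 0)
  let sums := PySem.List.sorted st.1.keys (fun k => k) true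
  let index := sums.map (fun s => (st.1.getD s []).reverse)
  (sums, index)

-- ===== PRECONDITION & SPEC =====
-- Pre_ excludes only the empty list, on which Python's A raises IndexError (elems[0]).
def Pre_init_solution (elemens : List Int) : Prop := elemens ≠ []
instance (elemens : List Int) : Decidable (Pre_init_solution elemens) := by
  unfold Pre_init_solution; infer_instance
def pvWitness_init_solution : List Int := [1, -2, 1]

def Spec_init_solution (elemens : List Int) (out : List Int × List (List Int)) : Prop :=
  out = init_solution_alt elemens
instance (elemens : List Int) (out : List Int × List (List Int)) :
    Decidable (Spec_init_solution elemens out) := by unfold Spec_init_solution; infer_instance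

-- ===== CLAIM (what is proved, stated in full; the proofs are below) =====
def Claim_equal_init_solution : Prop := ∀ (elemens : List Int), Dom_init_solution elemens →
  Pre_init_solution elemens → Spec_init_solution elemens (init_solution elemens)

-- ===== LEMMAS AND PROOFS =====

-- every index produced by acumAux is ≥ its starting index
theorem acumAux_snd_ge : ∀ (t : List Int) (prev i : Int) (p : Int × Int),
    p ∈ acumAux prev i t → i ≤ p.2 := by
  intro t
  induction t with
  | nil => intro prev i p hp; simp [acumAux] at hp
  | cons e t ih =>
    intro prev i p hp
    simp only [acumAux, List.mem_cons] at hp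
    rcases hp with h | h
    · simp [h]
    · have := ih (prev + e) (i + 1) p h; omega

theorem acumAux_snd_pairwise : ∀ (t : List Int) (prev i : Int),
    (acumAux prev i t).Pairwise (fun a b => a.2 < b.2) := by
  intro t
  induction t with
  | nil => intro prev i; simp [acumAux]
  | cons e t ih =>
    intro prev i
    simp only [acumAux, List.pairwise_cons]
    refine ⟨fun p hp => ?_, ih (prev + e) (i + 1)⟩
    have := acumAux_snd_ge t (prev + e) (i + 1) p hp
    show i < p.2
    omega

theorem acum_snd_pairwise (e : Int) (t : List Int) :
    (acum_sum (e :: t)).Pairwise (fun a b => a.2 < b.2) := by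
  simp only [acum_sum, List.pairwise_cons]
  refine ⟨fun p hp => ?_, acumAux_snd_pairwise t e 1⟩
  have := acumAux_snd_ge t e 1 p hp
  show (0 : Int) < p.2
  omega

theorem acum_eq_acumAux (e : Int) (t : List Int) :
    acum_sum (e :: t) = acumAux 0 0 (e :: t) := by
  simp [acum_sum, acumAux]

-- B's single loop (dict and running sum together) is the bucket fold over the pair list
theorem Bfold : ∀ (t : List Int) (i prev : Int) (d : PySem.Dict Int (List Int)),
    (PySem.List.enumerate t i).foldl
      (fun (st : PySem.Dict Int (List Int) × Int) pr =>
        (st.1.modify (st.2 + pr.2) [] (fun l => l ++ [pr.1]), st.2 + pr.2)) (d, prev)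
    = ((acumAux prev i t).foldl (fun d p => d.modify p.1 [] (fun l => l ++ [p.2])) d,
       prev + t.sum) := by
  intro t
  induction t with
  | nil => intro i prev d; simp [PySem.List.enumerate_nil, acumAux]
  | cons e t ih =>
    intro i prev d
    rw [PySem.List.enumerate_cons]
    simp only [List.foldl_cons, acumAux]
    rw [ih]
    simp only [List.sum_cons]
    refine Prod.ext rfl ?_
    simp only
    ring

-- a flatMap of the filters over a Nodup key list covering l is a permutation of l
theorem flatMap_filter_perm : ∀ (ks : List Int) (l : List (Int × Int)), ks.Nodup →
    (∀ p ∈ l, p.1 ∈ ks) →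
    (ks.flatMap (fun k => l.filter (fun p => p.1 == k))).Perm l := by
  intro ks
  induction ks with
  | nil =>
    intro l _ hcov
    have : l = [] := by
      cases l with
      | nil => rfl
      | cons p t => exact absurd (hcov p (List.mem_cons_self)) (by simp)
    simp [this]
  | cons k ks ih =>
    intro l hnd hcov
    simp only [List.flatMap_cons]
    have hnd' : ks.Nodup := (List.nodup_cons.mp hnd).2
    have hk : k ∉ ks := (List.nodup_cons.mp hnd).1
    have hmapeq : ks.flatMap (fun k' => l.filter (fun p => p.1 == k'))
        = ks.flatMap (fun k' => (l.filter (fun p => !(p.1 == k))).filter (fun p => p.1 == k')) := by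
      apply List.flatMap_congr
      intro k' hk'
      have hne : k' ≠ k := fun h => hk (h ▸ hk')
      rw [List.filter_filter]
      apply List.filter_congr
      intro p _
      by_cases h : p.1 = k' <;> simp [h, hne]
    rw [hmapeq]
    have hcov' : ∀ p ∈ l.filter (fun p => !(p.1 == k)), p.1 ∈ ks := by
      intro p hp
      rw [List.mem_filter] at hp
      rcases List.mem_cons.mp (hcov p hp.1) with h | h
      · exact absurd h (by simpa using hp.2)
      · exact h
    exact (List.Perm.append_left _
      (ih (l.filter (fun p => !(p.1 == k))) hnd' hcov')).trans
      (List.filter_append_perm _ l)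

-- appendLast appends to the final entry
theorem appendLast_concat : ∀ (l : List (List Int)) (c : List Int) (x : Int),
    appendLast (l ++ [c]) x = l ++ [c ++ [x]] := by
  intro l
  induction l with
  | nil => intro c x; simp [appendLast]
  | cons h t ih =>
    intro c x
    cases t with
    | nil => simp [appendLast]
    | cons g t' => simpa [appendLast] using ih c x

-- processing a run of items all carrying the current last sum appends their indices to the last bucket
theorem loopA_bucket : ∀ (items : List (Int × Int)) (k : Int), (∀ p ∈ items, p.1 = k) →
    ∀ (rest : List (Int × Int)) (sums0 : List Int) (idx0 : List (List Int)) (cur : List Int),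
    loopA (items ++ rest) (sums0 ++ [k]) (idx0 ++ [cur])
      = loopA rest (sums0 ++ [k]) (idx0 ++ [cur ++ items.map (fun p => p.2)]) := by
  intro items
  induction items with
  | nil => intro k _ rest sums0 idx0 cur; simp
  | cons q qs ih =>
    intro k hall rest sums0 idx0 cur
    have hq : q.1 = k := hall q List.mem_cons_self
    simp only [List.cons_append, loopA, List.getLastD_concat, hq, beq_self_eq_true, if_true]
    rw [appendLast_concat]
    rw [ih k (fun p hp => hall p (List.mem_cons_of_mem q hp)) rest sums0 idx0 (cur ++ [q.2])]
    simp

-- the whole pop loop over a descending bucket structure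
theorem loopA_main : ∀ (ks : List Int) (g : Int → List (Int × Int)), ks.Nodup →
    (∀ k ∈ ks, g k ≠ [] ∧ ∀ p ∈ g k, p.1 = k) →
    ∀ (sums0 : List Int) (k0 : Int) (idx : List (List Int)), k0 ∉ ks →
    loopA (ks.flatMap g) (sums0 ++ [k0]) idx
      = (sums0 ++ [k0] ++ ks, idx ++ ks.map (fun k => (g k).map (fun p => p.2))) := by
  intro ks
  induction ks with
  | nil => intro g _ _ sums0 k0 idx _; simp [loopA]
  | cons k1 ks' ih =>
    intro g hnd hg sums0 k0 idx hk0
    have hne : k1 ≠ k0 := fun h => hk0 (h ▸ List.mem_cons_self)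
    obtain ⟨hgne, hgall⟩ := hg k1 List.mem_cons_self
    obtain ⟨q, qs, hq⟩ : ∃ q qs, g k1 = q :: qs := by
      cases h : g k1 with
      | nil => exact absurd h hgne
      | cons q qs => exact ⟨q, qs, rfl⟩
    have hq1 : q.1 = k1 := hgall q (by simp [hq])
    simp only [List.flatMap_cons, hq, List.cons_append, loopA, List.getLastD_concat]
    have hbf : (q.1 == k0) = false := by simp [hq1, hne]
    rw [hbf]
    simp only [Bool.false_eq_true, if_false]
    have hall' : ∀ p ∈ qs, p.1 = k1 := fun p hp => hgall p (by simp [hq, hp])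
    have hstep : sums0 ++ [k0] ++ [q.1] = (sums0 ++ [k0]) ++ [k1] := by rw [hq1]
    rw [hstep]
    rw [loopA_bucket qs k1 hall' (ks'.flatMap g) (sums0 ++ [k0]) idx [q.2]]
    rw [ih g (List.nodup_cons.mp hnd).2 (fun k hk => hg k (List.mem_cons_of_mem k1 hk))
        (sums0 ++ [k0]) k1 (idx ++ [[q.2] ++ qs.map (fun p => p.2)]) (List.nodup_cons.mp hnd).1]
    simp [hq]

-- ascending list of the distinct prefix sums
def ksAscOf (P : List (Int × Int)) : List Int :=
  PySem.List.sorted (PySem.Set.ofList (P.map (fun p => p.1))) (fun k => k) false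

-- the sorted pair list, characterised as buckets in ascending key order
theorem sorted_eq_buckets (P : List (Int × Int))
    (hsnd : P.Pairwise (fun a b => a.2 < b.2)) :
    PySem.List.sorted P (fun p => (toLex p : Int ×ₗ Int)) false
      = (ksAscOf P).flatMap (fun k => P.filter (fun p => p.1 == k)) := by
  have hks : (ksAscOf P).Pairwise (fun a b => a < b) :=
    PySem.List.sorted_ofList_pairwise_lt (P.map (fun p => p.1))
  have hnd : (ksAscOf P).Nodup := hks.nodup
  apply PySem.List.sorted_eq_of_perm_of_pairwise_lt
  · apply flatMap_filter_perm _ _ hnd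
    intro p hp
    rw [ksAscOf, PySem.List.mem_sorted, PySem.Set.mem_ofList]
    exact List.mem_map_of_mem hp
  · rw [List.flatMap_def, List.pairwise_flatten]
    constructor
    · intro l hl
      rw [List.mem_map] at hl
      obtain ⟨k, _, rfl⟩ := hl
      refine List.Pairwise.imp_of_mem ?_ (hsnd.filter (fun p => p.1 == k))
      intro a b ha hb hab
      have ha1 : a.1 = k := by simpa using (List.mem_filter.mp ha).2
      have hb1 : b.1 = k := by simpa using (List.mem_filter.mp hb).2
      rw [Prod.Lex.lt_iff]
      right
      exact ⟨by simp [ha1, hb1], by simpa using hab⟩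
    · rw [List.pairwise_map]
      refine hks.imp_of_mem ?_
      intro k1 k2 _ _ hlt x hx y hy
      have hx1 : x.1 = k1 := by simpa using (List.mem_filter.mp hx).2
      have hy1 : y.1 = k2 := by simpa using (List.mem_filter.mp hy).2
      rw [Prod.Lex.lt_iff]
      left
      simp only [ofLex_toLex]
      omega

-- ===== VERDICT (by name: the statement is the Claim_ definition above) =====
theorem init_solution_spec : Claim_equal_init_solution := by
  unfold Claim_equal_init_solution
  intro elemens _ hpre
  unfold Spec_init_solution
  obtain ⟨e, t, rfl⟩ : ∃ e t, elemens = e :: t := by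
    cases elemens with
    | nil => exact absurd rfl hpre
    | cons e t => exact ⟨e, t, rfl⟩
  set P : List (Int × Int) := acum_sum (e :: t) with hP
  have hsnd : P.Pairwise (fun a b => a.2 < b.2) := acum_snd_pairwise e t
  set ksAsc : List Int := ksAscOf P with hksAsc
  set ks : List Int := ksAsc.reverse with hksdef
  set bucket : Int → List (Int × Int) := fun k => P.filter (fun p => p.1 == k) with hbucket
  set g : Int → List (Int × Int) := fun k => (bucket k).reverse with hg
  have hksasc_pw : ksAsc.Pairwise (fun a b => a < b) :=
    PySem.List.sorted_ofList_pairwise_lt (P.map (fun p => p.1))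
  have hks_nd : ks.Nodup := by rw [hksdef, List.nodup_reverse]; exact hksasc_pw.nodup
  have hks_mem : ∀ k, k ∈ ks ↔ k ∈ P.map (fun p => p.1) := by
    intro k
    rw [hksdef, List.mem_reverse, hksAsc, ksAscOf, PySem.List.mem_sorted, PySem.Set.mem_ofList]
  have hgcond : ∀ k ∈ ks, g k ≠ [] ∧ ∀ p ∈ g k, p.1 = k := by
    intro k hk
    constructor
    · obtain ⟨p, hp, hp1⟩ := List.mem_map.mp ((hks_mem k).mp hk)
      intro hnil
      rw [hg] at hnil
      simp only at hnil
      rw [List.reverse_eq_nil_iff, hbucket] at hnil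
      have := List.filter_eq_nil_iff.mp hnil p hp
      simp [hp1] at this
    · intro p hp
      rw [hg] at hp
      simp only [List.mem_reverse, hbucket, List.mem_filter] at hp
      simpa using hp.2
  -- the reversed sorted pair list is the descending bucket structure
  have hrev : (PySem.List.sorted P (fun p => (toLex p : Int ×ₗ Int)) false).reverse
      = ks.flatMap g := by
    rw [sorted_eq_buckets P hsnd, List.reverse_flatMap]
    rfl
  -- the keys list is nonempty
  have hksne : ks ≠ [] := by
    intro hnil
    have : (e, (0 : Int)) ∈ P := by rw [hP]; simp [acum_sum]
    have he : e ∈ P.map (fun p => p.1) := by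
      simpa using List.mem_map_of_mem (f := fun p => p.1) this
    have := (hks_mem e).mpr he
    simp [hnil] at this
  obtain ⟨k0, ks0, hksc⟩ : ∃ k0 ks0, ks = k0 :: ks0 := by
    cases hks : ks with
    | nil => exact absurd hks hksne
    | cons k0 ks0 => exact ⟨k0, ks0, rfl⟩
  obtain ⟨hgne0, hgall0⟩ := hgcond k0 (by rw [hksc]; exact List.mem_cons_self)
  obtain ⟨q, qs, hq⟩ : ∃ q qs, g k0 = q :: qs := by
    cases h : g k0 with
    | nil => exact absurd h hgne0
    | cons q qs => exact ⟨q, qs, rfl⟩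
  have hq1 : q.1 = k0 := hgall0 q (by simp [hq])
  -- evaluate port A
  have hA : init_solution (e :: t)
      = (ks, ks.map (fun k => (g k).map (fun p => p.2))) := by
    rw [init_solution]
    simp only [← hP, hrev, hksc, List.flatMap_cons, hq, List.cons_append]
    rw [show [q.1] = ([] : List Int) ++ [k0] by simp [hq1]]
    rw [show [[q.2]] = ([] : List (List Int)) ++ [[q.2]] by simp]
    rw [loopA_bucket qs k0 (fun p hp => hgall0 p (by simp [hq, hp])) (ks0.flatMap g) [] [] [q.2]]
    rw [loopA_main ks0 g (by rw [hksc] at hks_nd; exact (List.nodup_cons.mp hks_nd).2)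
        (fun k hk => hgcond k (by rw [hksc]; exact List.mem_cons_of_mem k0 hk)) [] k0 _
        (by rw [hksc] at hks_nd; exact (List.nodup_cons.mp hks_nd).1)]
    simp [hq]
  -- evaluate port B
  have hB : init_solution_alt (e :: t)
      = (ks, ks.map (fun k => (g k).map (fun p => p.2))) := by
    rw [init_solution_alt]
    simp only
    rw [Bfold (e :: t) 0 0 PySem.Dict.empty]
    simp only [← acum_eq_acumAux, ← hP]
    have hkeys : ((P.foldl (fun d p => d.modify p.1 [] (fun l => l ++ [p.2]))
        (PySem.Dict.empty : PySem.Dict Int (List Int)))).keys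
        = PySem.Set.ofList (P.map (fun p => p.1)) := by
      rw [PySem.Dict.keys_foldl_modify_key P (fun p => p.1) [] (fun _ p => fun l => l ++ [p.2])
          PySem.Dict.empty]
      rw [PySem.Dict.keys_empty]
      rfl
    rw [hkeys]
    have hsorted : PySem.List.sorted (PySem.Set.ofList (P.map (fun p => p.1)))
        (fun k => k) true = ks := by
      apply PySem.List.sorted_rev_eq_of_perm_of_pairwise_gt
      · have hap : ksAsc.Perm (PySem.Set.ofList (P.map (fun p => p.1))) := by
          rw [hksAsc, ksAscOf]
          exact PySem.List.sorted_perm _ _ _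
        exact (List.reverse_perm ksAsc).trans hap
      · rw [hksdef, List.pairwise_reverse]
        exact hksasc_pw
    rw [hsorted]
    refine Prod.ext rfl ?_
    simp only
    apply List.map_congr_left
    intro k _
    rw [PySem.Dict.getD_foldl_modify_append P PySem.Dict.empty k]
    rw [PySem.Dict.getD_empty]
    simp only [List.nil_append, hg, hbucket]
    rw [List.map_reverse]
  rw [hA, hB]
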